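-- pv_equiv track=rewrite | github.com/Liumuc/Enigma | enigma_v1.py | list_move
-- ===== SOURCE A (Python) =====
-- def list_move(l,n):
--     cnt = 0
--     for _ in range(len(l)):
--         if cnt == n:
--             break
--         l.append(l[0])
--         l.remove(l[0])
--         cnt +=1
--     return l
-- ===== SOURCE B (Python) =====
-- def list_move(l, n):
--     k = len(l) if (n < 0 or n > len(l)) else n
--     l[:k] = l[:k][::-1]
--     l[k:] = l[k:][::-1]
--     l[:] = l[::-1]
--     return l
-- ===== Notes on version B (the rewrite author's own statement) =====
-- stated objective: faster
-- what changed: Replaces the per-element append+remove loop (each remove is a linear scan, O(n^2) total) with a closed-form rotation count and the classic three-reversal in-place rotation (O(n)); both mutate l in place identically.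
import Mathlib
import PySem

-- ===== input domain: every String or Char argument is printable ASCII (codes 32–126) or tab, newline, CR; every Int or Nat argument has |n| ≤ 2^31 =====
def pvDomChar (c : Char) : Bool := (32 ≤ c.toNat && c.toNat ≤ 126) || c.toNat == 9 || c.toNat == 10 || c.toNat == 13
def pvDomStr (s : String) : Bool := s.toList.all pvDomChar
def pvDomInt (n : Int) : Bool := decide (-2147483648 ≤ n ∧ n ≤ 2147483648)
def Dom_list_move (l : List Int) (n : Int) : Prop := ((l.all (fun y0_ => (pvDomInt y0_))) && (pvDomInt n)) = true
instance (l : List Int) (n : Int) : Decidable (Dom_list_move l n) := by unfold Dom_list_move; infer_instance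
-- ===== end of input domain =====

-- B replaces A's O(n^2) append/remove loop by the O(n) three-reversal rotation; both mutate l
-- in place to the same final contents, and the equivalence proved here is about the return value.

-- ===== PORT A =====
-- A's for-loop: fuel = range(len(l)); each iteration (unless cnt == n breaks) does
-- l.append(l[0]); l.remove(l[0]) — on a nonempty list this moves the head to the back.
-- The [] branch is unreachable (the loop runs len(l) times, length is preserved).
def list_move_loop (fuel : Nat) (l : List Int) (cnt n : Int) : List Int :=
  match fuel with
  | 0 => l
  | fuel' + 1 =>
    if cnt = n then l
    else
      match l with
      | [] => []
      | h :: t => list_move_loop fuel' (t ++ [h]) (cnt + 1) n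

def list_move (l : List Int) (n : Int) : List Int :=
  list_move_loop l.length l 0 n

-- ===== PORT B =====
def list_move_alt (l : List Int) (n : Int) : List Int :=
  let len : Int := l.length
  let k : Int := if n < 0 ∨ n > len then len else n
  -- l[:k] = l[:k][::-1]
  let l1 : List Int := (l.take k.toNat).reverse ++ l.drop k.toNat
  -- l[k:] = l[k:][::-1]
  let l2 : List Int := l1.take k.toNat ++ (l1.drop k.toNat).reverse
  -- l[:] = l[::-1]
  l2.reverse

-- ===== PRECONDITION & SPEC =====
def Spec_list_move (l : List Int) (n : Int) (out : List Int) : Prop := out = list_move_alt l n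
instance (l : List Int) (n : Int) (out : List Int) : Decidable (Spec_list_move l n out) := by unfold Spec_list_move; infer_instance

-- ===== CLAIM (what is proved, stated in full; the proofs are below) =====
def Claim_equal_list_move : Prop := ∀ (l : List Int) (n : Int), Dom_list_move l n → Spec_list_move l n (list_move l n)

-- ===== LEMMAS AND PROOFS =====

-- A's loop computes a rotation: it performs min(fuel, n - cnt) steps (or all fuel steps
-- if cnt can never reach n, i.e. n < cnt), each step rotating the list left by one.
lemma list_move_loop_rotate : ∀ (fuel : Nat) (l : List Int) (cnt n : Int),
    list_move_loop fuel l cnt n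
      = l.rotate (if cnt ≤ n then min fuel (n - cnt).toNat else fuel) := by
  intro fuel
  induction fuel with
  | zero =>
    intro l cnt n
    simp [list_move_loop]
  | succ fuel' ih =>
    intro l cnt n
    by_cases h : cnt = n
    · subst h
      simp [list_move_loop]
    · match l with
      | [] => simp [list_move_loop, h]
      | a :: t =>
        have hstep : (if cnt ≤ n then min (fuel' + 1) (n - cnt).toNat else fuel' + 1)
            = (if cnt + 1 ≤ n then min fuel' (n - (cnt + 1)).toNat else fuel') + 1 := by
          split <;> split <;> omega
        simp only [list_move_loop, if_neg h, ih (t ++ [a]) (cnt + 1) n, hstep,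
          List.rotate_cons_succ]

-- B computes drop k ++ take k.
lemma list_move_alt_eq (l : List Int) (n : Int) :
    list_move_alt l n
      = l.drop (if n < 0 ∨ n > (l.length : Int) then l.length else n.toNat)
        ++ l.take (if n < 0 ∨ n > (l.length : Int) then l.length else n.toNat) := by
  unfold list_move_alt
  simp only []
  set k : Int := if n < 0 ∨ n > (l.length : Int) then (l.length : Int) else n with hk
  have hk0 : 0 ≤ k := by rw [hk]; split <;> omega
  have hkn : k.toNat = (if n < 0 ∨ n > (l.length : Int) then l.length else n.toNat) := by
    rw [hk]; split <;> omega
  have hkle : k.toNat ≤ l.length := by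
    rw [hkn]; split <;> omega
  have htk : ((l.take k.toNat).reverse ++ l.drop k.toNat).take k.toNat
      = (l.take k.toNat).reverse := by
    rw [List.take_append_of_le_length (by simp [List.length_take]; omega)]
    simp
  have hdk : ((l.take k.toNat).reverse ++ l.drop k.toNat).drop k.toNat = l.drop k.toNat := by
    rw [List.drop_append_of_le_length (by simp [List.length_take]; omega)]
    simp [List.length_take, Nat.min_eq_left hkle]
  rw [htk, hdk, hkn]
  simp

-- ===== VERDICT (by name: the statement is the Claim_ definition above) =====
theorem list_move_spec : Claim_equal_list_move := by
  unfold Claim_equal_list_move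
  intro l n _
  unfold Spec_list_move
  unfold list_move
  rw [list_move_loop_rotate, list_move_alt_eq]
  set s : Nat := (if (0 : Int) ≤ n then min l.length (n - 0).toNat else l.length) with hs
  have hsl : s ≤ l.length := by rw [hs]; split <;> omega
  rw [List.rotate_eq_drop_append_take hsl]
  have : s = (if n < 0 ∨ n > (l.length : Int) then l.length else n.toNat) := by
    rw [hs]; split <;> split <;> omega
  rw [this]
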